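-- pv_equiv track=rewrite | github.com/NVIDIA/cuda-python | cuda_core/tests/test_utils.py | _dense_strides
-- ===== SOURCE A (Python) =====
-- def _dense_strides(shape, stride_order):
--     ndim = len(shape)
--     strides = [None] * ndim
--     if ndim > 0:
--         if stride_order == "C":
--             strides[-1] = 1
--             for i in range(ndim - 2, -1, -1):
--                 strides[i] = strides[i + 1] * shape[i + 1]
--         else:
--             assert stride_order == "F"
--             strides[0] = 1
--             for i in range(1, ndim):
--                 strides[i] = strides[i - 1] * shape[i - 1]
--     return tuple(strides)
-- ===== SOURCE B (Python) =====
-- def _dense_strides(shape, stride_order):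
--     # Each stride is computed independently as the product of a slice of the
--     # shape (no running accumulator, no stride table read back): for "C" order
--     # stride i is prod(shape[i+1:]); for "F" order it is prod(shape[:i]).
--     if not shape:
--         return ()
--
--     def prod(xs):
--         p = 1
--         for x in xs:
--             p *= x
--         return p
--
--     if stride_order == "C":
--         return tuple(prod(shape[i + 1:]) for i in range(len(shape)))
--     assert stride_order == "F"
--     return tuple(prod(shape[:i]) for i in range(len(shape)))
-- ===== Notes on version B (the rewrite author's own statement) =====
-- stated objective: alternative
-- what changed: Each stride is computed independently as the product of a slice of the shape (prod(shape[i+1:]) for C, prod(shape[:i]) for F), replacing A's sequential pass that reads the previously stored stride from a preallocated table; this trades O(n) for O(n^2) but removes all loop-carried state.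
import Mathlib
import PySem

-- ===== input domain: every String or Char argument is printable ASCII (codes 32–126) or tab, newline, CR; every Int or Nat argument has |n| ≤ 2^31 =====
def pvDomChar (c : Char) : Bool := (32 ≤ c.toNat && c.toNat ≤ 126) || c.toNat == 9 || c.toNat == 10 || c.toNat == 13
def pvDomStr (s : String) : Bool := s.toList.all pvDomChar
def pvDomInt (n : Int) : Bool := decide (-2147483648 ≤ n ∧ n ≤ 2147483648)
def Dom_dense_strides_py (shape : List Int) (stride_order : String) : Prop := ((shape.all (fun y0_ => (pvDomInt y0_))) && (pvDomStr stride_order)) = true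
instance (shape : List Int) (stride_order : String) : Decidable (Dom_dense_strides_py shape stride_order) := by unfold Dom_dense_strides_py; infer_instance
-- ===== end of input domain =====

-- B computes each stride independently as the product of a slice of the shape,
-- replacing A's sequential table-filling pass that reads back the previous
-- stride; objective: alternative (no loop-carried state, O(n²) vs A's O(n)).

-- ===== PORT A =====
-- The Python `[None] * ndim` slots are modeled as 0; every slot is written
-- before it is read, so the placeholder value is never observed.
-- `strides[-1] = 1` is the in-range negative-index write, i.e. index ndim-1.
def dense_strides_py (shape : List Int) (stride_order : String) : List Int :=
  let ndim : Int := (shape.length : Int)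
  if ndim > 0 then
    if stride_order = "C" then
      let strides := (List.replicate shape.length (0:Int)).set (shape.length - 1) 1
      (PySem.List.pyRange (ndim - 2) (-1) (-1)).foldl
        (fun st i => st.set i.toNat (PySem.List.pyGetD st (i+1) 0 * PySem.List.pyGetD shape (i+1) 0)) strides
    else
      -- Python: assert stride_order == "F" (raises otherwise; excluded by Pre_)
      let strides := (List.replicate shape.length (0:Int)).set 0 1
      (PySem.List.pyRange 1 ndim 1).foldl
        (fun st i => st.set i.toNat (PySem.List.pyGetD st (i-1) 0 * PySem.List.pyGetD shape (i-1) 0)) strides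
  else []

-- ===== PORT B =====
-- Source B's `prod` helper: a left fold multiplying into an accumulator starting at 1.
def pvProd (xs : List Int) : Int := xs.foldl (fun p x => p * x) 1

def dense_strides_py_alt (shape : List Int) (stride_order : String) : List Int :=
  if shape = [] then []
  else if stride_order = "C" then
    (List.range shape.length).map (fun (i : Nat) => pvProd (PySem.List.slice shape (some ((i : Int) + 1)) none))
  else
    -- Python: assert stride_order == "F" (raises otherwise; excluded by Pre_)
    (List.range shape.length).map (fun (i : Nat) => pvProd (PySem.List.slice shape none (some (i : Int))))

-- ===== PRECONDITION & SPEC =====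
-- Pre_ excludes exactly the inputs on which both Pythons raise AssertionError:
-- a nonempty shape with a stride_order other than "C" or "F".
def Pre_dense_strides_py (shape : List Int) (stride_order : String) : Prop :=
  shape = [] ∨ stride_order = "C" ∨ stride_order = "F"
instance (shape : List Int) (stride_order : String) : Decidable (Pre_dense_strides_py shape stride_order) := by unfold Pre_dense_strides_py; infer_instance
def pvWitness_dense_strides_py : List Int × String := ([2, 3, 4], "C")

def Spec_dense_strides_py (shape : List Int) (stride_order : String) (out : List Int) : Prop := out = dense_strides_py_alt shape stride_order
instance (shape : List Int) (stride_order : String) (out : List Int) : Decidable (Spec_dense_strides_py shape stride_order out) := by unfold Spec_dense_strides_py; infer_instance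

-- ===== CLAIM (what is proved, stated in full; the proofs are below) =====
def Claim_equal_dense_strides_py : Prop := ∀ (shape : List Int) (stride_order : String), Dom_dense_strides_py shape stride_order → Pre_dense_strides_py shape stride_order → Spec_dense_strides_py shape stride_order (dense_strides_py shape stride_order)

-- ===== LEMMAS AND PROOFS =====

theorem pvProd_eq_prod (xs : List Int) : pvProd xs = xs.prod := by
  rw [pvProd, List.prod_eq_foldl]

-- A's F loop fills positions k..n-1 of the table with prefix products.
theorem fillF (shape : List Int) : ∀ (m k : Nat), k + m = shape.length → 1 ≤ k →
    (PySem.List.pyRange (k : Int) (shape.length : Int) 1).foldl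
      (fun st i => st.set i.toNat (PySem.List.pyGetD st (i-1) 0 * PySem.List.pyGetD shape (i-1) 0))
      ((List.range k).map (fun i => (shape.take i).prod) ++ List.replicate m 0)
    = (List.range shape.length).map (fun i => (shape.take i).prod) := by
  intro m
  induction m with
  | zero =>
    intro k hk _
    rw [PySem.List.pyRange_one_eq_nil (by omega)]
    simp [← hk]
  | succ m ih =>
    intro k hk hk1
    rw [PySem.List.pyRange_one_cons (by omega), List.foldl_cons]
    have hstep : ((List.range k).map (fun i => (shape.take i).prod) ++ List.replicate (m+1) 0).set
        ((k : Int)).toNat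
        (PySem.List.pyGetD ((List.range k).map (fun i => (shape.take i).prod) ++ List.replicate (m+1) 0) ((k:Int)-1) 0 *
         PySem.List.pyGetD shape ((k:Int)-1) 0)
        = (List.range (k+1)).map (fun i => (shape.take i).prod) ++ List.replicate m 0 := by
      have h1 : ((k:Int) - 1) = ((k-1 : Nat) : Int) := by omega
      have hlen : ((List.range k).map (fun i => (shape.take i).prod)).length = k := by simp
      rw [h1, PySem.List.pyGetD_natCast, PySem.List.pyGetD_natCast]
      have hget1 : ((List.range k).map (fun i => (shape.take i).prod) ++ List.replicate (m+1) 0).getD (k-1) 0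
          = (shape.take (k-1)).prod := by
        rw [List.getD_eq_getElem _ _ (by simp; omega)]
        rw [List.getElem_append_left (by omega)]
        simp [List.getElem_range]
      have hget2 : shape.getD (k-1) 0 = shape[k-1]'(by omega) := by
        rw [List.getD_eq_getElem _ _ (by omega)]
      rw [hget1, hget2]
      have hprod : (shape.take (k-1)).prod * shape[k-1]'(by omega) = (shape.take k).prod := by
        have := List.prod_take_succ shape (k-1) (by omega)
        have hk' : k - 1 + 1 = k := by omega
        rw [hk'] at this
        rw [this]
      rw [Int.toNat_natCast, hprod, List.set_append_right _ _ (by simp)]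
      simp [List.range_succ, List.replicate_succ]
    rw [hstep]
    have : ((k:Int) + 1) = ((k+1 : Nat) : Int) := by omega
    rw [this]
    exact ih (k+1) (by omega) (by omega)

-- A's C loop fills positions 0..k-1 of the table with suffix products.
theorem fillC (shape : List Int) : ∀ (k : Nat), k ≤ shape.length - 1 →
    (PySem.List.pyRange ((k : Int) - 1) (-1) (-1)).foldl
      (fun st i => st.set i.toNat (PySem.List.pyGetD st (i+1) 0 * PySem.List.pyGetD shape (i+1) 0))
      (List.replicate k 0 ++ (List.range (shape.length - k)).map (fun j => (shape.drop (k + j + 1)).prod))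
    = (List.range shape.length).map (fun j => (shape.drop (j + 1)).prod) := by
  intro k
  induction k with
  | zero =>
    intro _
    rw [PySem.List.pyRange_neg_one_eq_nil (by omega)]
    simp
  | succ k ih =>
    intro hk
    have hcons : PySem.List.pyRange (((k+1 : Nat) : Int) - 1) (-1) (-1)
        = (k : Int) :: PySem.List.pyRange ((k : Int) - 1) (-1) (-1) := by
      have : (((k+1 : Nat) : Int) - 1) = (k : Int) := by omega
      rw [this, PySem.List.pyRange_neg_one_cons (by omega)]
    rw [hcons, List.foldl_cons]
    have hstep : (List.replicate (k+1) (0:Int) ++ (List.range (shape.length - (k+1))).map (fun j => (shape.drop (k+1 + j + 1)).prod)).set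
        ((k : Int)).toNat
        (PySem.List.pyGetD (List.replicate (k+1) (0:Int) ++ (List.range (shape.length - (k+1))).map (fun j => (shape.drop (k+1 + j + 1)).prod)) ((k:Int)+1) 0 *
         PySem.List.pyGetD shape ((k:Int)+1) 0)
        = List.replicate k 0 ++ (List.range (shape.length - k)).map (fun j => (shape.drop (k + j + 1)).prod) := by
      have h1 : ((k:Int) + 1) = ((k+1 : Nat) : Int) := by omega
      rw [h1, PySem.List.pyGetD_natCast, PySem.List.pyGetD_natCast, Int.toNat_natCast]
      have hget1 : (List.replicate (k+1) (0:Int) ++ (List.range (shape.length - (k+1))).map (fun j => (shape.drop (k+1 + j + 1)).prod)).getD (k+1) 0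
          = (shape.drop (k+2)).prod := by
        rw [List.getD_eq_getElem _ _ (by simp; omega)]
        rw [List.getElem_append_right (by simp)]
        simp only [List.length_replicate, List.getElem_map, List.getElem_range]
        congr 2
        omega
      have hget2 : shape.getD (k+1) 0 = shape[k+1]'(by omega) := by
        rw [List.getD_eq_getElem _ _ (by omega)]
      rw [hget1, hget2]
      have hprod : (shape.drop (k+2)).prod * shape[k+1]'(by omega) = (shape.drop (k+1)).prod := by
        have hd := List.drop_eq_getElem_cons (l := shape) (i := k+1) (by omega)
        rw [hd, List.prod_cons]
        exact mul_comm _ _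
      rw [hprod]
      have hrep : List.replicate (k+1) (0:Int) = List.replicate k 0 ++ [0] := by
        simp [List.replicate_succ']
      rw [hrep, List.append_assoc, List.set_append_right _ _ (by simp)]
      congr 1
      have hnk : shape.length - k = (shape.length - (k+1)) + 1 := by omega
      rw [hnk, List.range_succ_eq_map]
      simp only [List.length_replicate, Nat.sub_self, List.map_cons, List.map_map,
        List.singleton_append, List.set_cons_zero]
      refine congrArg₂ List.cons (by norm_num) ?_
      apply List.map_congr_left
      intro j _
      simp only [Function.comp_apply]
      congr 2
      omega
    rw [hstep]
    exact ih (by omega)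

-- B's branches in closed form: each slice product is a drop/take product.
theorem alt_C_closed (shape : List Int) :
    (List.range shape.length).map (fun (i : Nat) => pvProd (PySem.List.slice shape (some ((i : Int) + 1)) none))
      = (List.range shape.length).map (fun j => (shape.drop (j + 1)).prod) := by
  apply List.map_congr_left
  intro i _
  have h1 : ((i : Int) + 1) = ((i + 1 : Nat) : Int) := by omega
  rw [pvProd_eq_prod, h1, PySem.List.slice_from_natCast]

theorem alt_F_closed (shape : List Int) :
    (List.range shape.length).map (fun (i : Nat) => pvProd (PySem.List.slice shape none (some (i : Int))))
      = (List.range shape.length).map (fun i => (shape.take i).prod) := by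
  apply List.map_congr_left
  intro i _
  rw [pvProd_eq_prod, PySem.List.slice_to_natCast]

-- ===== VERDICT (by name: the statement is the Claim_ definition above) =====
theorem dense_strides_py_spec : Claim_equal_dense_strides_py := by
  unfold Claim_equal_dense_strides_py
  intro shape so _ hpre
  unfold Spec_dense_strides_py dense_strides_py dense_strides_py_alt
  by_cases hnil : shape = []
  · subst hnil; simp
  · have hlen : 1 ≤ shape.length := by
      cases shape with
      | nil => exact absurd rfl hnil
      | cons a l => simp
    simp only [if_neg hnil, if_pos (show ((shape.length : Int) > 0) by exact_mod_cast hlen)]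
    by_cases hC : so = "C"
    · simp only [if_pos hC]
      rw [alt_C_closed]
      have hinit : (List.replicate shape.length (0:Int)).set (shape.length - 1) 1
          = List.replicate (shape.length - 1) 0 ++
            (List.range (shape.length - (shape.length - 1))).map
              (fun j => (shape.drop ((shape.length - 1) + j + 1)).prod) := by
        have h1 : shape.length - (shape.length - 1) = 1 := by omega
        rw [h1]
        have h2 : List.replicate shape.length (0:Int) = List.replicate (shape.length - 1) 0 ++ [0] := by
          rw [← List.replicate_succ']
          congr 1
          omega
        rw [h2, List.set_append_right _ _ (by simp)]
        simp [List.range_succ, List.drop_eq_nil_of_le (by omega : shape.length ≤ shape.length - 1 + 0 + 1)]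
      have hrange : (shape.length : Int) - 2 = (((shape.length - 1 : Nat)) : Int) - 1 := by omega
      rw [hrange, hinit]
      exact fillC shape (shape.length - 1) (by omega)
    · simp only [if_neg hC]
      rw [alt_F_closed]
      have hinit : (List.replicate shape.length (0:Int)).set 0 1
          = (List.range 1).map (fun i => (shape.take i).prod) ++ List.replicate (shape.length - 1) 0 := by
        have h2 : List.replicate shape.length (0:Int) = 0 :: List.replicate (shape.length - 1) 0 := by
          rw [← List.replicate_succ]
          congr 1
          omega
        rw [h2]
        simp [List.range_succ]
      rw [hinit]
      have := fillF shape (shape.length - 1) 1 (by omega) (by omega)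
      simp only [one_mul, Nat.cast_one] at this ⊢
      exact this
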